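-- pv_equiv track=rewrite | github.com/ifmcnichols/2023_advent_of_code | day_01_solution.py | get_first_digit_pt2
-- ===== SOURCE A (Python) =====
-- nums_dict_forward = {
--     "one": 1,
--     "two": 2,
--     "three": 3,
--     "four": 4,
--     "five": 5,
--     "six": 6,
--     "seven": 7,
--     "eight": 8,
--     "nine": 9,
-- }
--
-- nums_dict_backward = {
--     "eno": 1,
--     "owt": 2,
--     "eerht": 3,
--     "rouf": 4,
--     "evif": 5,
--     "xis": 6,
--     "neves": 7,
--     "thgie": 8,
--     "enin": 9,
--     "net": 10
-- }
--
-- def get_first_digit_pt2(entry, forward=True):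
--     if forward:
--         nums_dict = nums_dict_forward
--     else:
--         nums_dict = nums_dict_backward
--     for i in range(len(entry)):
--         if entry[i].isdigit():
--             return entry[i]
--         else:
--             for j in range(0, i):
--                 if entry[j:i+1] in nums_dict.keys():
--                     return str(nums_dict[entry[j:i+1]])
-- ===== SOURCE B (Python) =====
-- nums_dict_forward = {
--     "one": 1, "two": 2, "three": 3, "four": 4, "five": 5,
--     "six": 6, "seven": 7, "eight": 8, "nine": 9,
-- }
--
-- nums_dict_backward = {
--     "eno": 1, "owt": 2, "eerht": 3, "rouf": 4, "evif": 5,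
--     "xis": 6, "neves": 7, "thgie": 8, "enin": 9, "net": 10,
-- }
--
-- def get_first_digit_pt2(entry, forward=True):
--     nums_dict = nums_dict_forward if forward else nums_dict_backward
--     for i, c in enumerate(entry):
--         if c.isdigit():
--             return c
--         # only a suffix of length 3..5 ending at i can be a spelled number,
--         # longest first (matches the smallest-j-first scan of the naive version)
--         for L in (5, 4, 3):
--             if L <= i + 1:
--                 val = nums_dict.get(entry[i + 1 - L:i + 1])
--                 if val is not None:
--                     return str(val)
--     return None
-- ===== Notes on version B (the rewrite author's own statement) =====
-- stated objective: faster
-- what changed: A scans every start position j in 0..i-1 at each character i (checking each substring entry[j:i+1] against the dict); B checks only the three possible spelled-number lengths 5, 4, 3 as a suffix ending at i (longest first, the same order as A's ascending-j scan), making the per-character work O(1).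
import Mathlib
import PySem

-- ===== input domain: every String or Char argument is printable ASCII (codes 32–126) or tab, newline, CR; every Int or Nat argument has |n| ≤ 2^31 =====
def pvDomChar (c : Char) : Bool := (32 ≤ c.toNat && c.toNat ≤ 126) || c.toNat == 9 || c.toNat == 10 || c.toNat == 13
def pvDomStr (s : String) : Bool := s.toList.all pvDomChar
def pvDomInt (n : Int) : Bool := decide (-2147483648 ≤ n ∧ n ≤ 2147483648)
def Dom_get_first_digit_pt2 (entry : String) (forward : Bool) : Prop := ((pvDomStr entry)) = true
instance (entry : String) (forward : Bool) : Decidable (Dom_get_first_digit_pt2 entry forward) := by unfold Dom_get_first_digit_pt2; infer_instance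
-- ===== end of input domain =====

-- B replaces A's inner scan over every start position j (O(n) per character, O(n^2) total)
-- by checking only the three possible spelled-number lengths 5,4,3 ending at each position
-- (longest first, the same order as A's ascending-j scan). Objective: faster (asymptotic).

-- ===== PORT A =====
-- the module-level dicts (string keys represented as List Char)
def pvDictF : PySem.Dict (List Char) Int :=
  PySem.Dict.mk [(['o','n','e'],1), (['t','w','o'],2), (['t','h','r','e','e'],3),
    (['f','o','u','r'],4), (['f','i','v','e'],5), (['s','i','x'],6),
    (['s','e','v','e','n'],7), (['e','i','g','h','t'],8), (['n','i','n','e'],9)]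

def pvDictB : PySem.Dict (List Char) Int :=
  PySem.Dict.mk [(['e','n','o'],1), (['o','w','t'],2), (['e','e','r','h','t'],3),
    (['r','o','u','f'],4), (['e','v','i','f'],5), (['x','i','s'],6),
    (['n','e','v','e','s'],7), (['t','h','g','i','e'],8), (['e','n','i','n'],9),
    (['n','e','t'],10)]

-- 'for j in range(0, i): if entry[j:i+1] in nums_dict.keys(): return str(nums_dict[entry[j:i+1]])'
def pvInnerA (cs : List Char) (d : PySem.Dict (List Char) Int) (i : Int) : List Int → Option String
  | [] => none
  | j :: js =>
    if d.contains (PySem.List.slice cs (some j) (some (i+1))) then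
      some (PySem.Int.toStr (d.getD (PySem.List.slice cs (some j) (some (i+1))) 0))
    else pvInnerA cs d i js

-- 'for i in range(len(entry)): if entry[i].isdigit(): return entry[i] else: <inner loop>'
def pvOuterA (cs : List Char) (d : PySem.Dict (List Char) Int) : List Int → Option String
  | [] => none
  | i :: is =>
    match PySem.List.pyGet? cs i with
    | some c =>
      if PySem.Chars.strIsdigit [c] then some (String.ofList [c])
      else
        match pvInnerA cs d i (PySem.List.pyRange 0 i) with
        | some r => some r
        | none => pvOuterA cs d is
    | none => none  -- unreachable: i ∈ range(len(entry))

def get_first_digit_pt2 (entry : String) (forward : Bool) : Option String :=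
  let nums_dict := if forward then pvDictF else pvDictB
  pvOuterA entry.toList nums_dict (PySem.List.pyRange 0 (PySem.Str.len entry))

-- ===== PORT B =====
-- 'if L <= i + 1: val = nums_dict.get(entry[i+1-L:i+1]); if val is not None: return str(val)'
def pvCheck (cs : List Char) (d : PySem.Dict (List Char) Int) (i L : Int) : Option String :=
  if L ≤ i + 1 then
    match d.get? (PySem.List.slice cs (some (i + 1 - L)) (some (i + 1))) with
    | some v => some (PySem.Int.toStr v)
    | none => none
  else none

-- 'for L in (5, 4, 3): …'
def pvTryWords (cs : List Char) (d : PySem.Dict (List Char) Int) (i : Int) : Option String :=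
  match pvCheck cs d i 5 with
  | some r => some r
  | none =>
    match pvCheck cs d i 4 with
    | some r => some r
    | none => pvCheck cs d i 3

-- 'for i, c in enumerate(entry): if c.isdigit(): return c else: <three suffix checks>'
def pvOuterB (cs : List Char) (d : PySem.Dict (List Char) Int) : List (Int × Char) → Option String
  | [] => none
  | (i, c) :: rest =>
    if PySem.Chars.strIsdigit [c] then some (String.ofList [c])
    else
      match pvTryWords cs d i with
      | some r => some r
      | none => pvOuterB cs d rest

def get_first_digit_pt2_alt (entry : String) (forward : Bool) : Option String :=
  let nums_dict := if forward then pvDictF else pvDictB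
  pvOuterB entry.toList nums_dict (PySem.List.enumerate entry.toList 0)

-- ===== PRECONDITION & SPEC =====
def Spec_get_first_digit_pt2 (entry : String) (forward : Bool) (out : Option String) : Prop := out = get_first_digit_pt2_alt entry forward
instance (entry : String) (forward : Bool) (out : Option String) : Decidable (Spec_get_first_digit_pt2 entry forward out) := by unfold Spec_get_first_digit_pt2; infer_instance

-- ===== CLAIM (what is proved, stated in full; the proofs are below) =====
def Claim_equal_get_first_digit_pt2 : Prop := ∀ (entry : String) (forward : Bool), Dom_get_first_digit_pt2 entry forward → Spec_get_first_digit_pt2 entry forward (get_first_digit_pt2 entry forward)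

-- ===== LEMMAS AND PROOFS =====

-- every key of either dict has length 3, 4 or 5
lemma pvKeyLen (d : PySem.Dict (List Char) Int) (hd : d = pvDictF ∨ d = pvDictB)
    (s : List Char) (h : d.contains s = true) :
    s.length = 3 ∨ s.length = 4 ∨ s.length = 5 := by
  rcases hd with rfl | rfl <;>
  · rw [PySem.Dict.contains_iff_mem_keys] at h
    simp [pvDictF, pvDictB, PySem.Dict.keys_mk] at h
    rcases h with rfl|rfl|rfl|rfl|rfl|rfl|rfl|rfl|rfl|rfl <;> simp

lemma pvSliceLen (cs : List Char) (j i : Int) (h0 : 0 ≤ j) (h1 : j ≤ i + 1)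
    (h2 : i + 1 ≤ (cs.length : Int)) :
    ((PySem.List.slice cs (some j) (some (i+1))).length : Int) = i + 1 - j := by
  rw [PySem.List.slice_of_nonneg cs h0 (by omega) (by omega) h2]
  simp
  omega

-- a slice whose length is not 3, 4 or 5 is never a key
lemma pvNotKey (cs : List Char) (d : PySem.Dict (List Char) Int)
    (hd : d = pvDictF ∨ d = pvDictB) (j i : Int) (h0 : 0 ≤ j) (h1 : j ≤ i + 1)
    (h2 : i + 1 ≤ (cs.length : Int))
    (hlen : ¬ (i + 1 - j = 3 ∨ i + 1 - j = 4 ∨ i + 1 - j = 5)) :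
    d.contains (PySem.List.slice cs (some j) (some (i+1))) = false := by
  by_contra hc
  have hc' : d.contains (PySem.List.slice cs (some j) (some (i+1))) = true := by
    revert hc; cases d.contains (PySem.List.slice cs (some j) (some (i+1))) <;> simp
  have := pvKeyLen d hd _ hc'
  have hl := pvSliceLen cs j i h0 h1 h2
  omega

lemma pvInnerA_append (cs : List Char) (d : PySem.Dict (List Char) Int) (i : Int)
    (l1 l2 : List Int) :
    pvInnerA cs d i (l1 ++ l2) =
      match pvInnerA cs d i l1 with
      | some r => some r
      | none => pvInnerA cs d i l2 := by
  induction l1 with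
  | nil => simp [pvInnerA]
  | cons j js ih =>
    simp only [List.cons_append, pvInnerA]
    split_ifs with h
    · rfl
    · exact ih

lemma pvInnerA_none (cs : List Char) (d : PySem.Dict (List Char) Int) (i : Int)
    (l : List Int)
    (h : ∀ j ∈ l, d.contains (PySem.List.slice cs (some j) (some (i+1))) = false) :
    pvInnerA cs d i l = none := by
  induction l with
  | nil => rfl
  | cons j js ih =>
    simp only [pvInnerA]
    rw [h j (by simp)]
    simp only [Bool.false_eq_true, if_false]
    exact ih (fun x hx => h x (by simp [hx]))

-- A's membership-then-lookup step equals B's single get? step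
lemma pvBranchEq (d : PySem.Dict (List Char) Int) (s : List Char) (z : Option String) :
    (if d.contains s then some (PySem.Int.toStr (d.getD s 0)) else z) =
      match d.get? s with
      | some v => some (PySem.Int.toStr v)
      | none => z := by
  rw [PySem.Dict.contains_eq_isSome_get?]
  cases hg : d.get? s with
  | none => simp
  | some v => simp [PySem.Dict.getD_of_get?_eq_some d 0 hg]

-- the inner scan over all j equals the three bounded suffix checks
lemma pvInnerEq (cs : List Char) (d : PySem.Dict (List Char) Int)
    (hd : d = pvDictF ∨ d = pvDictB) (i : Int) (h0 : 0 ≤ i)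
    (hi : i < (cs.length : Int)) :
    pvInnerA cs d i (PySem.List.pyRange 0 i) = pvTryWords cs d i := by
  by_cases h4 : 4 ≤ i
  · rw [PySem.List.pyRange_one_append 0 (i-4) i (by omega) (by omega), pvInnerA_append]
    rw [pvInnerA_none cs d i _ (fun j hj => by
      rw [PySem.List.mem_pyRange_one] at hj
      exact pvNotKey cs d hd j i (by omega) (by omega) (by omega) (by omega))]
    have hr : PySem.List.pyRange (i-4) i = [i-4, i-3, i-2, i-1] := by
      rw [PySem.List.pyRange_one_cons (by omega : i-4 < i), show i-4+1 = i-3 by ring,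
          PySem.List.pyRange_one_cons (by omega : i-3 < i), show i-3+1 = i-2 by ring,
          PySem.List.pyRange_one_cons (by omega : i-2 < i), show i-2+1 = i-1 by ring,
          PySem.List.pyRange_one_cons (by omega : i-1 < i), show i-1+1 = i by ring,
          PySem.List.pyRange_one_eq_nil (by omega : i ≤ i)]
    rw [hr]
    simp only [pvInnerA, pvTryWords, pvCheck]
    rw [if_pos (show (5:Int) ≤ i + 1 by omega), if_pos (show (4:Int) ≤ i + 1 by omega),
        if_pos (show (3:Int) ≤ i + 1 by omega),
        show i + 1 - 5 = i - 4 by ring, show i + 1 - 4 = i - 3 by ring,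
        show i + 1 - 3 = i - 2 by ring]
    rw [pvNotKey cs d hd (i-1) i (by omega) (by omega) (by omega) (by omega)]
    simp only [Bool.false_eq_true, if_false]
    rw [pvBranchEq, pvBranchEq, pvBranchEq]
    cases d.get? (PySem.List.slice cs (some (i-4)) (some (i+1))) <;>
      cases d.get? (PySem.List.slice cs (some (i-3)) (some (i+1))) <;>
      cases d.get? (PySem.List.slice cs (some (i-2)) (some (i+1))) <;> rfl
  · have hcase : i = 0 ∨ i = 1 ∨ i = 2 ∨ i = 3 := by omega
    rcases hcase with rfl | rfl | rfl | rfl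
    · rw [show PySem.List.pyRange 0 0 = [] from by decide]
      rfl
    · rw [show PySem.List.pyRange 0 1 = [0] from by decide]
      simp only [pvInnerA]
      rw [pvNotKey cs d hd 0 1 (by omega) (by omega) (by omega) (by omega)]
      rfl
    · rw [show PySem.List.pyRange 0 2 = [0, 1] from by decide]
      simp only [pvInnerA, pvTryWords, pvCheck]
      rw [pvNotKey cs d hd 1 2 (by omega) (by omega) (by omega) (by omega)]
      simp only [Bool.false_eq_true, if_false]
      rw [pvBranchEq]
      norm_num
    · rw [show PySem.List.pyRange 0 3 = [0, 1, 2] from by decide]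
      simp only [pvInnerA, pvTryWords, pvCheck]
      rw [pvNotKey cs d hd 2 3 (by omega) (by omega) (by omega) (by omega)]
      simp only [Bool.false_eq_true, if_false]
      rw [pvBranchEq, pvBranchEq]
      norm_num
      cases d.get? (PySem.List.slice cs none (some 4)) <;>
        cases d.get? (PySem.List.slice cs (some 1) (some 4)) <;> rfl

-- the outer loops agree position by position
lemma pvOuterEq (cs : List Char) (d : PySem.Dict (List Char) Int)
    (hd : d = pvDictF ∨ d = pvDictB) :
    ∀ (n k : Nat), cs.length - k = n →
      pvOuterA cs d (PySem.List.pyRange (k : Int) (cs.length : Int)) =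
        pvOuterB cs d (PySem.List.enumerate (cs.drop k) (k : Int)) := by
  intro n
  induction n with
  | zero =>
    intro k hk
    rw [List.drop_eq_nil_of_le (by omega), PySem.List.pyRange_one_eq_nil (by exact_mod_cast (by omega : cs.length ≤ k))]
    rfl
  | succ m ih =>
    intro k hk
    have hklen : k < cs.length := by omega
    rw [PySem.List.pyRange_one_cons (by exact_mod_cast hklen), List.drop_eq_getElem_cons hklen]
    simp only [PySem.List.enumerate, pvOuterA, pvOuterB]
    have hget : PySem.List.pyGet? cs (k : Int) = some cs[k] := by
      rw [PySem.List.pyGet?_natCast, List.getElem?_eq_getElem hklen]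
    rw [hget]
    have hih := ih (k + 1) (by omega)
    push_cast at hih
    by_cases hdig : PySem.Chars.strIsdigit [cs[k]] = true
    · simp only [hdig, if_true]
    · simp only [hdig]
      rw [pvInnerEq cs d hd (k : Int) (by omega) (by exact_mod_cast hklen)]
      cases pvTryWords cs d (k : Int) with
      | none => exact hih
      | some r => rfl

-- ===== VERDICT (by name: the statement is the Claim_ definition above) =====
theorem get_first_digit_pt2_spec : Claim_equal_get_first_digit_pt2 := by
  intro entry forward _
  unfold Spec_get_first_digit_pt2 get_first_digit_pt2 get_first_digit_pt2_alt
  have hd : (if forward then pvDictF else pvDictB) = pvDictF ∨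
      (if forward then pvDictF else pvDictB) = pvDictB := by
    cases forward <;> simp
  have h := pvOuterEq entry.toList _ hd entry.toList.length 0 (by omega)
  simpa [PySem.Str.len] using h
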